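-- pv_equiv track=rewrite | github.com/emmaebjohnson/CPTS355 | HW3/HW3.py | merge_logs
-- ===== SOURCE A (Python) =====
-- def combine_dict(log1, log2):
--      d = {}
--      for (day, num) in log1.items():
--           d[day] = num
--
--      for (day, num) in log2.items():
--                if day not in d:
--                     d[day] = num
--                else:
--                     d[day] += num
--      return d
--
-- def merge_logs(log_list):
--      d = {}
--      for dict in log_list:
--           for (classes, log) in dict.items():
--                if classes not in d:
--                     d[classes] = log
--                else:
--                     d[classes] = combine_dict(d[classes], log)
--      return d
-- ===== SOURCE B (Python) =====
-- def merge_logs(log_list):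
--     d = {}
--     for log in log_list:
--         for classes, inner in log.items():
--             acc = d.setdefault(classes, {})
--             for day, num in inner.items():
--                 acc[day] = acc.get(day, 0) + num
--     return d
-- ===== Notes on version B (the rewrite author's own statement) =====
-- stated objective: faster
-- what changed: B accumulates every (class, day, count) entry directly into one nested dict in a single pass (setdefault + get), instead of A's rebuilding a fresh copy of the whole per-class dict via combine_dict on every repeated class.
import Mathlib
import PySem

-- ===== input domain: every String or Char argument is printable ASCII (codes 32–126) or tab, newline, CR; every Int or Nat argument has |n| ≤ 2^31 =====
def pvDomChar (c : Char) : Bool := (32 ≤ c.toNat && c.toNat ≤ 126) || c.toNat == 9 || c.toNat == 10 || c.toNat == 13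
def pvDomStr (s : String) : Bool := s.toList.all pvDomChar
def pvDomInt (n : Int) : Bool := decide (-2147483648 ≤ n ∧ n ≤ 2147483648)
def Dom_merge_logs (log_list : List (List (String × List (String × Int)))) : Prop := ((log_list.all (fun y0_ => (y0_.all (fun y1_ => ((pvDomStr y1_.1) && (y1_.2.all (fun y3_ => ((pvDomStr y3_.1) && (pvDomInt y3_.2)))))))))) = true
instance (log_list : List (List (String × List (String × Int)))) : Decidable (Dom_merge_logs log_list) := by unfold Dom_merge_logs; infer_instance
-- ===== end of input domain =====

-- B folds every (class, day, count) entry straight into one nested dict (setdefault/get-style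
-- accumulation) instead of A's per-merge rebuild of the whole per-class dict via combine_dict.
-- Return values agree; A's returned inner dicts may alias input dicts, B's never do.


-- ===== PORT A =====
-- combine_dict: copy log1 into a fresh dict, then fold log2 in with a membership branch.
def combineDict (log1 log2 : PySem.Dict String Int) : PySem.Dict String Int :=
  let d := log1.items.foldl (fun d p => d.insert p.1 p.2) PySem.Dict.empty
  log2.items.foldl
    (fun d p => if d.contains p.1 = false then d.insert p.1 p.2
                else d.insert p.1 (d.getD p.1 0 + p.2)) d

def merge_logs (log_list : List (List (String × List (String × Int)))) : List (String × List (String × Int)) :=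
  let d := log_list.foldl
    (fun d dict => dict.foldl
      (fun d p =>
        if d.contains p.1 = false then d.insert p.1 (PySem.Dict.mk p.2)
        else d.insert p.1 (combineDict (d.getD p.1 (PySem.Dict.mk [])) (PySem.Dict.mk p.2)))
      d)
    PySem.Dict.empty
  d.items.map (fun p => (p.1, p.2.items))

-- ===== PORT B =====
-- acc = d.setdefault(classes, {}) followed by in-place accumulation of inner into acc
-- is exactly d.modify classes {} (accumInner inner)  (modify d k d0 f = `d[k] = f(d.get(k, d0))`).
def accumInner (inner : List (String × Int)) (acc : PySem.Dict String Int) : PySem.Dict String Int :=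
  inner.foldl (fun acc q => acc.insert q.1 (acc.getD q.1 0 + q.2)) acc

def merge_logs_alt (log_list : List (List (String × List (String × Int)))) : List (String × List (String × Int)) :=
  let d := log_list.foldl
    (fun d log => log.foldl
      (fun d p => d.modify p.1 PySem.Dict.empty (accumInner p.2))
      d)
    PySem.Dict.empty
  d.items.map (fun p => (p.1, p.2.items))

-- ===== PRECONDITION & SPEC =====
-- Pre_ requires every inner day-association list to have distinct keys: the Python argument holds
-- dicts (which cannot contain duplicate keys), so assoc lists with a repeated day key represent no
-- Python input at all; on them A's port keeps the raw duplicated list while B's port collapses it.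
def Pre_merge_logs (log_list : List (List (String × List (String × Int)))) : Prop :=
  ∀ dict ∈ log_list, ∀ p ∈ dict, (p.2.map Prod.fst).Nodup

instance (log_list : List (List (String × List (String × Int)))) : Decidable (Pre_merge_logs log_list) := by
  unfold Pre_merge_logs; infer_instance

def pvWitness_merge_logs : (List (List (String × List (String × Int)))) :=
  [[("math", [("mon", 2), ("tue", 1)])], [("math", [("mon", 3)]), ("art", [("wed", 4)])]]

def Spec_merge_logs (log_list : List (List (String × List (String × Int)))) (out : List (String × List (String × Int))) : Prop := out = merge_logs_alt log_list
instance (log_list : List (List (String × List (String × Int)))) (out : List (String × List (String × Int))) : Decidable (Spec_merge_logs log_list out) := by unfold Spec_merge_logs; infer_instance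

-- ===== CLAIM (what is proved, stated in full; the proofs are below) =====
def Claim_equal_merge_logs : Prop := ∀ (log_list : List (List (String × List (String × Int)))), Dom_merge_logs log_list → Pre_merge_logs log_list → Spec_merge_logs log_list (merge_logs log_list)

-- ===== LEMMAS AND PROOFS =====

-- Accumulating an inner list whose (pairwise distinct) keys are all fresh for acc just appends it.
lemma accumInner_fresh (l : List (String × Int)) (acc : PySem.Dict String Int)
    (hfresh : ∀ q ∈ l, acc.contains q.1 = false) (hnd : (l.map Prod.fst).Nodup) :
    (accumInner l acc).items = acc.items ++ l := by
  induction l generalizing acc with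
  | nil => simp [accumInner]
  | cons q t ih =>
    have hq := hfresh q (List.mem_cons_self ..)
    simp only [List.map_cons, List.nodup_cons] at hnd
    have hstep : acc.insert q.1 (acc.getD q.1 0 + q.2) = acc.insert q.1 q.2 := by
      rw [PySem.Dict.getD_of_not_contains _ _ hq, zero_add]
    simp only [accumInner, List.foldl_cons]
    rw [hstep, show (List.foldl (fun acc q => acc.insert q.1 (acc.getD q.1 0 + q.2))
        (acc.insert q.1 q.2) t) = accumInner t (acc.insert q.1 q.2) from rfl,
      ih _ ?_ hnd.2, PySem.Dict.items_insert_of_not_contains _ _ hq]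
    · simp
    · intro q' hq'
      rw [PySem.Dict.contains_insert]
      have hne : q'.1 ≠ q.1 := fun he => hnd.1 (he ▸ List.mem_map_of_mem hq')
      simp [hne, hfresh q' (List.mem_cons_of_mem _ hq')]

-- combine_dict's first loop rebuilds acc exactly when acc's keys are distinct.
lemma copy_eq (d : PySem.Dict String Int) (h : d.keys.Nodup) :
    d.items.foldl (fun d p => d.insert p.1 p.2) PySem.Dict.empty = d := by
  apply PySem.Dict.ext
  rw [PySem.Dict.items_foldl_insert_fresh d.items Prod.fst Prod.snd PySem.Dict.empty
    (fun a _ => PySem.Dict.contains_empty _) (by simpa [PySem.Dict.keys] using h)]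
  simp [PySem.Dict.empty]

-- combine_dict acc (mk l2) is a fold with the same net effect per entry as accumInner.
lemma combine_eq_accum (acc : PySem.Dict String Int) (l2 : List (String × Int))
    (hacc : acc.keys.Nodup) :
    combineDict acc (PySem.Dict.mk l2) = accumInner l2 acc := by
  unfold combineDict accumInner
  rw [copy_eq acc hacc]
  have hfun : (fun (d : PySem.Dict String Int) (p : String × Int) =>
      if d.contains p.1 = false then d.insert p.1 p.2
      else d.insert p.1 (d.getD p.1 0 + p.2))
      = fun d p => d.insert p.1 (d.getD p.1 0 + p.2) := by
    funext d p
    by_cases hc : d.contains p.1 = false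
    · simp [hc, PySem.Dict.getD_of_not_contains _ _ hc]
    · simp [hc]
  rw [hfun]

lemma getD_mem_values (d : PySem.Dict String (PySem.Dict String Int)) (k : String)
    (h : d.contains k = true) (dflt : PySem.Dict String Int) : d.getD k dflt ∈ d.values := by
  rw [PySem.Dict.contains_eq_isSome_get?] at h
  obtain ⟨v, hv⟩ := Option.isSome_iff_exists.mp h
  rw [PySem.Dict.getD_eq_get?_getD, hv]
  simpa [PySem.Dict.values] using
    List.mem_map_of_mem (f := fun x => x.2) (PySem.Dict.mem_items_of_get?_eq_some _ hv)

-- invariant along the merge loop: every stored per-class dict has distinct keys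
def ValsNodup (d : PySem.Dict String (PySem.Dict String Int)) : Prop :=
  ∀ v ∈ d.values, v.keys.Nodup

lemma accumInner_nodup (l : List (String × Int)) (acc : PySem.Dict String Int)
    (h : acc.keys.Nodup) : (accumInner l acc).keys.Nodup :=
  PySem.Dict.nodup_keys_foldl_insert_key l Prod.fst (fun acc q => acc.getD q.1 0 + q.2) acc h

-- one entry of the merge loop: A's branchy step equals B's modify step, and preserves the invariant
lemma step_eq (d : PySem.Dict String (PySem.Dict String Int)) (p : String × List (String × Int))
    (hp : (p.2.map Prod.fst).Nodup) (hinv : ValsNodup d) :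
    (if d.contains p.1 = false then d.insert p.1 (PySem.Dict.mk p.2)
     else d.insert p.1 (combineDict (d.getD p.1 (PySem.Dict.mk [])) (PySem.Dict.mk p.2)))
      = d.modify p.1 PySem.Dict.empty (accumInner p.2)
    ∧ ValsNodup (d.modify p.1 PySem.Dict.empty (accumInner p.2)) := by
  have hmod : d.modify p.1 PySem.Dict.empty (accumInner p.2)
      = d.insert p.1 (accumInner p.2 (d.getD p.1 PySem.Dict.empty)) := rfl
  have hemp : (PySem.Dict.mk [] : PySem.Dict String Int) = PySem.Dict.empty := rfl
  by_cases hc : d.contains p.1 = false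
  · have hg : d.getD p.1 PySem.Dict.empty = PySem.Dict.empty :=
      PySem.Dict.getD_of_not_contains _ _ hc
    have hacc : accumInner p.2 PySem.Dict.empty = PySem.Dict.mk p.2 := by
      apply PySem.Dict.ext
      rw [accumInner_fresh p.2 _ (fun q _ => PySem.Dict.contains_empty _) hp]
      rfl
    refine ⟨by rw [hmod, hg, hacc, if_pos hc], ?_⟩
    intro v hv
    rw [hmod, hg, hacc] at hv
    rcases PySem.Dict.mem_values_insert _ _ _ _ hv with h | h
    · rw [h]; simpa [PySem.Dict.keys_mk] using hp
    · exact hinv v h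
  · have hct : d.contains p.1 = true := by simpa using hc
    have hacck : (d.getD p.1 (PySem.Dict.mk [])).keys.Nodup :=
      hinv _ (getD_mem_values d p.1 hct _)
    have hco := combine_eq_accum _ p.2 hacck
    refine ⟨by rw [if_neg hc, hmod, ← hemp, hco], ?_⟩
    intro v hv
    rw [hmod] at hv
    rcases PySem.Dict.mem_values_insert _ _ _ _ hv with h | h
    · rw [h]; exact accumInner_nodup _ _ (by rw [← hemp]; exact hacck)
    · exact hinv v h

-- one whole dict of the outer loop
lemma fold_dict_eq (dict : List (String × List (String × Int)))
    (d : PySem.Dict String (PySem.Dict String Int))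
    (hdict : ∀ p ∈ dict, (p.2.map Prod.fst).Nodup) (hinv : ValsNodup d) :
    dict.foldl (fun d p =>
        if d.contains p.1 = false then d.insert p.1 (PySem.Dict.mk p.2)
        else d.insert p.1 (combineDict (d.getD p.1 (PySem.Dict.mk [])) (PySem.Dict.mk p.2))) d
      = dict.foldl (fun d p => d.modify p.1 PySem.Dict.empty (accumInner p.2)) d
    ∧ ValsNodup (dict.foldl (fun d p => d.modify p.1 PySem.Dict.empty (accumInner p.2)) d) := by
  induction dict generalizing d with
  | nil => exact ⟨rfl, hinv⟩
  | cons p t ih =>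
    obtain ⟨h1, h2⟩ := step_eq d p (hdict p (List.mem_cons_self ..)) hinv
    obtain ⟨h3, h4⟩ := ih (d.modify p.1 PySem.Dict.empty (accumInner p.2))
      (fun q hq => hdict q (List.mem_cons_of_mem _ hq)) h2
    simp only [List.foldl_cons]
    rw [h1]
    exact ⟨h3, h4⟩

lemma fold_all_eq (log_list : List (List (String × List (String × Int))))
    (d : PySem.Dict String (PySem.Dict String Int))
    (hpre : ∀ dict ∈ log_list, ∀ p ∈ dict, (p.2.map Prod.fst).Nodup) (hinv : ValsNodup d) :
    log_list.foldl (fun d dict => dict.foldl (fun d p =>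
        if d.contains p.1 = false then d.insert p.1 (PySem.Dict.mk p.2)
        else d.insert p.1 (combineDict (d.getD p.1 (PySem.Dict.mk [])) (PySem.Dict.mk p.2))) d) d
      = log_list.foldl (fun d log => log.foldl
          (fun d p => d.modify p.1 PySem.Dict.empty (accumInner p.2)) d) d := by
  induction log_list generalizing d with
  | nil => rfl
  | cons dict t ih =>
    obtain ⟨h1, h2⟩ := fold_dict_eq dict d (hpre dict (List.mem_cons_self ..)) hinv
    simp only [List.foldl_cons]
    rw [h1]
    exact ih _ (fun q hq => hpre q (List.mem_cons_of_mem _ hq)) h2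

-- ===== VERDICT (by name: the statement is the Claim_ definition above) =====
theorem merge_logs_spec : Claim_equal_merge_logs := by
  intro log_list _hdom hpre
  unfold Spec_merge_logs merge_logs merge_logs_alt
  rw [fold_all_eq log_list PySem.Dict.empty hpre (by intro v hv; simp [PySem.Dict.values, PySem.Dict.empty] at hv)]
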